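-- pv_equiv track=rewrite | github.com/TempusFugit05/100-Days-of-Python-projects | Day 27 - Tkinter/Mile To KM Project.py | input_validator
-- ===== SOURCE A (Python) =====
-- def input_validator(user_input, acceptable_chars):
--     """Checks if the user input is a valid number"""
--     # Return false when string is empty
--     if len(user_input) == 0:
--         return False
--     # This variable checks if the user has put in too many decimal points to prevent errors
--     index_points = 0
--     # Iterates over all the characters in the user input
--     for char in user_input:
--
--         # If a character is not acceptable or is a decimal point in position 0, return False
--         if char not in acceptable_chars or (char == "." and user_input.index(char) == 0):
--             return False
--
--         # Add 1 to decimal tracker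
--         elif char == ".":
--             index_points += 1
--
--             # Return False if there are more than one decimal point or if the point is in the very end
--             if index_points > 1 or (char == "." and user_input.index(char) == len(user_input)-1):
--                 return False
--     # Return True if input passed all checks
--     return True
-- ===== SOURCE B (Python) =====
-- def input_validator(user_input, acceptable_chars):
--     """Checks if the user input is a valid number"""
--     if not user_input:
--         return False
--     if any(c not in acceptable_chars for c in user_input):
--         return False
--     if user_input.count('.') > 1:
--         return False
--     if '.' in user_input:
--         i = user_input.index('.')
--         if i == 0 or i == len(user_input) - 1:
--             return False
--     return True
-- ===== Notes on version B (the rewrite author's own statement) =====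
-- stated objective: simpler
-- what changed: Replaced A's single loop threading an index_points accumulator with early returns by four direct, independent checks (non-empty, all characters acceptable, at most one dot, first dot neither at position 0 nor last) using count/index.
import Mathlib
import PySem

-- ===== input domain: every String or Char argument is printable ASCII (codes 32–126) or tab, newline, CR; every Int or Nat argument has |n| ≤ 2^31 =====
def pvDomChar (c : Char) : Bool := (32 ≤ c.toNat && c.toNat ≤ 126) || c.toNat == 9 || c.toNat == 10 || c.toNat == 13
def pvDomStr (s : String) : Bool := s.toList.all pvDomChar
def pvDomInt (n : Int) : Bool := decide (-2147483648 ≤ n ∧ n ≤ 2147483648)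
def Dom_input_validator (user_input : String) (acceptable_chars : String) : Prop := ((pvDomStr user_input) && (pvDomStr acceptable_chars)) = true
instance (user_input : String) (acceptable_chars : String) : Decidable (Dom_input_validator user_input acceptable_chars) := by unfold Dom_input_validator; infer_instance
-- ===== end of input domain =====

-- B replaces A's accumulator-threading loop by four direct, independent checks (simpler decomposition; return value only).


-- ===== PORT A =====
-- the for-loop over user_input's characters, carrying index_points; `full` is the whole
-- string (for `user_input.index(char)` and `len(user_input)`); `user_input.index(char)` is
-- ported as PySem.Chars.find (char comes from the string, so str.index never raises here)
def inputValidatorGo (full : List Char) (acceptable : List Char) :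
    List Char → Int → Bool
  | [], _ => true
  | c :: rest, indexPoints =>
    if ¬ (PySem.Chars.isIn [c] acceptable = true) ∨
        (c = '.' ∧ PySem.Chars.find full [c] = 0) then
      false
    else if c = '.' then
      let ip := indexPoints + 1
      if ip > 1 ∨ (c = '.' ∧ PySem.Chars.find full [c] = (full.length : Int) - 1) then
        false
      else
        inputValidatorGo full acceptable rest ip
    else
      inputValidatorGo full acceptable rest indexPoints

def input_validator (user_input : String) (acceptable_chars : String) : Bool :=
  let ul := user_input.toList
  if ul.length = 0 then false
  else inputValidatorGo ul acceptable_chars.toList ul 0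

-- ===== PORT B =====
-- Source B's four direct checks; `user_input.index('.')` is ported as PySem.Chars.find
-- (it runs only under `'.' in user_input`, so str.index never raises)
def input_validator_alt (user_input : String) (acceptable_chars : String) : Bool :=
  let ul := user_input.toList
  let al := acceptable_chars.toList
  if ul.isEmpty then false
  else if ul.any (fun c => ¬ (PySem.Chars.isIn [c] al = true)) then false
  else if PySem.Chars.count ul ['.'] > 1 then false
  else if PySem.Chars.isIn ['.'] ul then
    let i := PySem.Chars.find ul ['.']
    if i = 0 ∨ i = (ul.length : Int) - 1 then false else true
  else true

-- ===== PRECONDITION & SPEC =====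
def Spec_input_validator (user_input : String) (acceptable_chars : String) (out : Bool) : Prop := out = input_validator_alt user_input acceptable_chars
instance (user_input : String) (acceptable_chars : String) (out : Bool) : Decidable (Spec_input_validator user_input acceptable_chars out) := by unfold Spec_input_validator; infer_instance

-- ===== CLAIM (what is proved, stated in full; the proofs are below) =====
def Claim_equal_input_validator : Prop := ∀ (user_input : String) (acceptable_chars : String), Dom_input_validator user_input acceptable_chars → Spec_input_validator user_input acceptable_chars (input_validator user_input acceptable_chars)

-- ===== LEMMAS AND PROOFS =====

-- single-character substring count is element count
theorem charsCount_go_singleton (c : Char) :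
    ∀ (l : List Char) (fuel acc : Nat), l.length ≤ fuel →
      PySem.Chars.count.go [c] fuel l acc = acc + l.count c := by
  intro l
  induction l with
  | nil =>
    intro fuel acc _
    cases fuel <;> simp only [PySem.Chars.count.go] <;> simp
  | cons h t ih =>
    intro fuel acc hf
    cases fuel with
    | zero => simp at hf
    | succ n =>
      have hf' : t.length ≤ n := by simp at hf; omega
      by_cases hc : c = h
      · subst hc
        have hp : [c].isPrefixOf (c :: t) = true := by simp [List.isPrefixOf]
        simp only [PySem.Chars.count.go, hp, if_pos, List.length_cons, List.length_nil,
          List.drop_succ_cons, List.drop_zero]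
        rw [ih n (acc + 1) hf']
        simp
        omega
      · have hp : [c].isPrefixOf (h :: t) = false := by
          simp [List.isPrefixOf]
          exact hc
        simp only [PySem.Chars.count.go, hp]
        rw [if_neg (by simp)]
        rw [ih n acc hf']
        rw [List.count_cons]
        simp [Ne.symm hc]

theorem charsCount_singleton (s : List Char) (c : Char) :
    PySem.Chars.count s [c] = s.count c := by
  simp only [PySem.Chars.count]
  rw [if_neg (by simp)]
  have := charsCount_go_singleton c s s.length 0 le_rfl
  omega

theorem isIn_singleton_iff (c : Char) (s : List Char) :
    PySem.Chars.isIn [c] s = true ↔ c ∈ s := by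
  rw [PySem.Chars.isIn_iff_infix]
  constructor
  · rintro ⟨p, q, h⟩
    subst h; simp
  · intro h
    obtain ⟨p, q, h⟩ := List.append_of_mem h
    exact ⟨p, q, by simp [h]⟩

-- characterisation of A's loop: it returns true iff every remaining char is acceptable and,
-- if a dot remains, the first dot of the full string is neither at index 0 nor at the end
-- and the total dot count (seen + remaining) is at most one
theorem inputValidatorGo_spec (full acceptable : List Char) :
    ∀ (rest : List Char) (ip : Int),
      inputValidatorGo full acceptable rest ip = true ↔
        ((∀ c ∈ rest, PySem.Chars.isIn [c] acceptable = true) ∧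
         ('.' ∈ rest →
            PySem.Chars.find full ['.'] ≠ 0 ∧
            ip + (rest.count '.' : Int) ≤ 1 ∧
            PySem.Chars.find full ['.'] ≠ (full.length : Int) - 1)) := by
  intro rest
  induction rest with
  | nil => intro ip; simp [inputValidatorGo]
  | cons c t ih =>
    intro ip
    by_cases hdot : c = '.'
    · subst hdot
      simp only [inputValidatorGo, true_and]
      by_cases hin : PySem.Chars.isIn ['.'] acceptable = true
      · by_cases h0 : PySem.Chars.find full ['.'] = 0
        · rw [if_pos (Or.inr h0)]
          simp only [Bool.false_eq_true, false_iff]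
          rintro ⟨_, hd⟩
          exact (hd (by simp)).1 h0
        · rw [if_neg (fun h => h.elim (fun h1 => h1 hin) h0), if_pos trivial]
          by_cases hend : ip + 1 > 1 ∨ PySem.Chars.find full ['.'] = (full.length : Int) - 1
          · rw [if_pos hend]
            simp only [Bool.false_eq_true, false_iff]
            rintro ⟨_, hd⟩
            have hd' := hd (by simp)
            rcases hend with hgt | hL
            · have := hd'.2.1
              rw [List.count_cons_self] at this
              push_cast at this
              omega
            · exact hd'.2.2 hL
          · rw [if_neg hend]
            rw [ih (ip + 1)]
            have hL : PySem.Chars.find full ['.'] ≠ (full.length : Int) - 1 :=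
              fun h => hend (Or.inr h)
            have hip : ¬ (ip + 1 > 1) := fun h => hend (Or.inl h)
            constructor
            · rintro ⟨hall, hd⟩
              refine ⟨fun x hx => by
                  rcases List.mem_cons.mp hx with hx | hx
                  · exact hx ▸ hin
                  · exact hall x hx,
                fun _ => ⟨h0, ?_, hL⟩⟩
              rw [List.count_cons_self]
              by_cases ht : '.' ∈ t
              · have := (hd ht).2.1
                push_cast
                push_cast at this
                omega
              · rw [List.count_eq_zero_of_not_mem ht]
                push_cast
                omega
            · rintro ⟨hall, hd⟩
              have hd' := hd List.mem_cons_self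
              refine ⟨fun x hx => hall x (List.mem_cons_of_mem _ hx), fun ht => ⟨h0, ?_, hL⟩⟩
              have := hd'.2.1
              rw [List.count_cons_self] at this
              push_cast at this ⊢
              omega
      · rw [if_pos (Or.inl hin)]
        simp only [Bool.false_eq_true, false_iff]
        rintro ⟨hall, _⟩
        exact hin (hall _ List.mem_cons_self)
    · -- c ≠ '.'
      simp only [inputValidatorGo]
      by_cases hin : PySem.Chars.isIn [c] acceptable = true
      · rw [if_neg (fun h => h.elim (fun h1 => h1 hin) (fun h2 => hdot h2.1)),
          if_neg hdot, ih ip]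
        have hcc : (c == '.') = false := beq_eq_false_iff_ne.mpr hdot
        simp only [List.mem_cons, List.count_cons, hcc, Bool.false_eq_true, if_false, add_zero]
        have hme : ('.' = c ∨ '.' ∈ t) ↔ ('.' ∈ t) :=
          ⟨fun h => h.elim (fun h' => absurd h'.symm hdot) id, Or.inr⟩
        rw [hme]
        constructor
        · rintro ⟨hall, hd⟩
          exact ⟨fun x hx => hx.elim (fun h => h ▸ hin) (hall x), hd⟩
        · rintro ⟨hall, hd⟩
          exact ⟨fun x hx => hall x (Or.inr hx), hd⟩
      · rw [if_pos (Or.inl hin)]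
        simp only [Bool.false_eq_true, false_iff]
        rintro ⟨hall, _⟩
        exact hin (hall _ List.mem_cons_self)
-- ===== VERDICT (by name: the statement is the Claim_ definition above) =====
theorem input_validator_spec : Claim_equal_input_validator := by
  intro u a _
  unfold Spec_input_validator input_validator input_validator_alt
  set ul := u.toList with hul
  set al := a.toList with hal
  by_cases hnil : ul = []
  · simp [hnil]
  · rw [if_neg (by simp [hnil])]
    rw [if_neg (by simp [hnil])]
    rw [Bool.eq_iff_iff]
    rw [inputValidatorGo_spec]
    rw [charsCount_singleton]
    have hiff : PySem.Chars.isIn ['.'] ul = true ↔ '.' ∈ ul := isIn_singleton_iff '.' ul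
    by_cases hall : ∀ c ∈ ul, PySem.Chars.isIn [c] al = true
    · rw [if_neg (by simp; exact fun x hx => by simpa using hall x hx)]
      by_cases hd : '.' ∈ ul
      · have hcntpos : 0 < ul.count '.' := List.count_pos_iff.mpr hd
        by_cases hc : ul.count '.' > 1
        · rw [if_pos (by exact_mod_cast hc)]
          refine iff_of_false (fun h => ?_) Bool.false_ne_true
          obtain ⟨_, hdd⟩ := h
          have := (hdd hd).2.1
          push_cast at this
          omega
        · rw [if_neg (by exact_mod_cast hc)]
          rw [if_pos (hiff.mpr hd)]
          by_cases hz : PySem.Chars.find ul ['.'] = 0 ∨ PySem.Chars.find ul ['.'] = (ul.length : Int) - 1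
          · rw [if_pos hz]
            refine iff_of_false (fun h => ?_) Bool.false_ne_true
            obtain ⟨_, hdd⟩ := h
            rcases hz with hz | hz
            · exact (hdd hd).1 hz
            · exact (hdd hd).2.2 hz
          · rw [if_neg hz]
            push Not at hz
            refine iff_of_true ⟨hall, fun _ => ⟨hz.1, ?_, hz.2⟩⟩ rfl
            omega
      · rw [if_neg (by
            rw [not_lt]
            have : ul.count '.' = 0 := List.count_eq_zero_of_not_mem hd
            omega)]
        rw [if_neg (fun h => hd (hiff.mp h))]
        exact iff_of_true ⟨hall, fun h => absurd h hd⟩ rfl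
    · rw [if_pos (by
          simp only [List.any_eq_true]
          push Not at hall
          obtain ⟨x, hx, hx2⟩ := hall
          exact ⟨x, hx, by simpa using hx2⟩)]
      refine iff_of_false (fun h => ?_) Bool.false_ne_true
      exact hall h.1
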